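-- pv_equiv track=rewrite | github.com/Neil-ZHOUYQ/Large-Scale-Gene-Trait-Association-Learning-from-GWAS-Data-using-Language-Model | biomedbert_full_genes/3_PrepareTrainDataset_folds.py | split_dict_into_folds
-- ===== SOURCE A (Python) =====
-- def split_dict_into_folds(data_dict, num_folds):
--
--     '''
--
--     '''
--     # Ensure the number of folds is at least 1
--     if num_folds < 1:
--         raise ValueError("Number of folds must be at least 1")
--
--     # Convert dictionary items to a list
--     items = list(data_dict.items())
--
--     # Calculate the size of each fold
--     fold_size = len(items) // num_folds
--     remainder = len(items) % num_folds
--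
--     # Create the folds
--     folds = []  #folds is a list and every element is a dictionary of gene-trait
--     start_index = 0
--     for i in range(num_folds):
--         end_index = start_index + fold_size + (1 if i < remainder else 0)
--         fold = dict(items[start_index:end_index])
--         folds.append(fold)
--         start_index = end_index    #separate the remainder(n) to 0:remainder(n) interations.
--
--     return folds
-- ===== SOURCE B (Python) =====
-- def split_dict_into_folds(data_dict, num_folds):
--     if num_folds < 1:
--         raise ValueError("Number of folds must be at least 1")
--     # peel off one fold at a time: of the k folds still to make, the next one
--     # takes ceil(len(remaining)/k) items; the remaining items shrink each step
--     items = list(data_dict.items())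
--     folds = []
--     k = num_folds
--     while k > 0:
--         head = (len(items) + k - 1) // k
--         folds.append(dict(items[:head]))
--         items = items[head:]
--         k -= 1
--     return folds
-- ===== Notes on version B (the rewrite author's own statement) =====
-- stated objective: alternative
-- what changed: Replaced the loop that threads a running start_index over a precomputed fold_size/remainder with a peel-off scheme: each step takes ceil(len(remaining)/k) items off a shrinking worklist as the next fold and decrements k, never computing fold_size or the remainder.
import Mathlib
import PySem

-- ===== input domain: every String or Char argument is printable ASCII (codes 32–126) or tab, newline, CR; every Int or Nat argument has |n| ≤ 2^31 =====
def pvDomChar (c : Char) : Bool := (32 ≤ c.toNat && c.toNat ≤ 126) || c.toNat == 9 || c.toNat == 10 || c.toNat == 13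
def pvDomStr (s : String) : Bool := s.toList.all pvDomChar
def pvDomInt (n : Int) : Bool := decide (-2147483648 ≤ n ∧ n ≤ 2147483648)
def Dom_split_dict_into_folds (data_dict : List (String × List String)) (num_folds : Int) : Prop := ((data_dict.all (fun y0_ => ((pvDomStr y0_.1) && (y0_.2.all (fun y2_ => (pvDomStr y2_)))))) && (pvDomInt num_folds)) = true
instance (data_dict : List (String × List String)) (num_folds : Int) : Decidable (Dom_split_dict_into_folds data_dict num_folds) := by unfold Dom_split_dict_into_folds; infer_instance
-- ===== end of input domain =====

-- B replaces A's fold_size/remainder loop with a running start_index by a peel-off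
-- loop: each step takes ceil(len/k) items off a shrinking worklist as the next fold
-- and decrements k (objective: alternative decomposition, same cost).

-- ===== PORT A =====
def split_dict_into_folds (data_dict : List (String × List String)) (num_folds : Int) : List (List (String × List String)) :=
  let items := data_dict
  let fold_size := PySem.Int.floordiv (items.length : Int) num_folds
  let remainder := PySem.Int.mod (items.length : Int) num_folds
  let st := (PySem.List.pyRange 0 num_folds 1).foldl
    (fun (acc : List (List (String × List String)) × Int) i =>
      let end_index := acc.2 + fold_size + (if i < remainder then 1 else 0)
      let fold := (PySem.Dict.ofList (PySem.List.slice items (some acc.2) (some end_index))).items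
      (acc.1 ++ [fold], end_index))
    ([], 0)
  st.1

-- ===== PORT B =====
-- the while loop of Source B: k counts the folds still to make (a Nat), items is the
-- shrinking worklist, folds the accumulator
def pvGoB : Nat → List (String × List String) → List (List (String × List String)) → List (List (String × List String))
  | 0, _, folds => folds
  | Nat.succ k, items, folds =>
      let head := PySem.Int.floordiv ((items.length : Int) + ((k : Int) + 1) - 1) ((k : Int) + 1)
      pvGoB k (PySem.List.slice items (some head) none)
        (folds ++ [(PySem.Dict.ofList (PySem.List.slice items none (some head))).items])

def split_dict_into_folds_alt (data_dict : List (String × List String)) (num_folds : Int) : List (List (String × List String)) :=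
  pvGoB num_folds.toNat data_dict []

-- ===== PRECONDITION & SPEC =====
-- Pre_ excludes num_folds < 1, where the Python A raises ValueError (and B raises too).
def Pre_split_dict_into_folds (data_dict : List (String × List String)) (num_folds : Int) : Prop := 1 ≤ num_folds
instance (data_dict : List (String × List String)) (num_folds : Int) : Decidable (Pre_split_dict_into_folds data_dict num_folds) := by unfold Pre_split_dict_into_folds; infer_instance
def pvWitness_split_dict_into_folds : (List (String × List String)) × Int := ([("a", ["x"]), ("b", [])], 2)

def Spec_split_dict_into_folds (data_dict : List (String × List String)) (num_folds : Int) (out : List (List (String × List String))) : Prop := out = split_dict_into_folds_alt data_dict num_folds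
instance (data_dict : List (String × List String)) (num_folds : Int) (out : List (List (String × List String))) : Decidable (Spec_split_dict_into_folds data_dict num_folds out) := by unfold Spec_split_dict_into_folds; infer_instance

-- ===== CLAIM (what is proved, stated in full; the proofs are below) =====
def Claim_equal_split_dict_into_folds : Prop := ∀ (data_dict : List (String × List String)) (num_folds : Int), Dom_split_dict_into_folds data_dict num_folds → Pre_split_dict_into_folds data_dict num_folds → Spec_split_dict_into_folds data_dict num_folds (split_dict_into_folds data_dict num_folds)

-- ===== LEMMAS AND PROOFS =====

-- the common closed form: fold j (of k folds, with q = n/k, r = n%k) is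
-- (items.drop (j*q + min j r)).take (q + (if j < r then 1 else 0)), as a dict
def pvFold (items : List (String × List String)) (q r j : Nat) : List (String × List String) :=
  (PySem.Dict.ofList ((items.drop (j * q + min j r)).take (q + (if j < r then 1 else 0)))).items

-- B's recursion produces the closed-form folds
lemma pvGoB_eq (k : Nat) : ∀ (items : List (String × List String))
    (folds : List (List (String × List String))) (q r : Nat),
    items.length = k * q + r → (r < k ∨ (k = 0 ∧ r = 0)) →
    pvGoB k items folds = folds ++ (List.range k).map (pvFold items q r) := by
  induction k with
  | zero => intro items folds q r _ _; simp [pvGoB]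
  | succ k ih =>
    intro items folds q r hn hr
    have hrk : r ≤ k := by omega
    have ekq : (k + 1) * q = k * q + q := by ring
    -- the head count h = ceil(n/(k+1)) = q + (if 0 < r then 1 else 0)
    obtain ⟨h, hh⟩ : ∃ h, h = q + (if 0 < r then 1 else 0) := ⟨_, rfl⟩
    have hdiv : (items.length + k) / (k + 1) = h := by
      by_cases h0 : 0 < r
      · rw [if_pos h0] at hh
        have e1 : (k + 1) * (q + 1) = (k + 1) * q + (k + 1) := by ring
        have e2 : items.length + k = (k + 1) * (q + 1) + (r - 1) := by omega
        rw [e2, Nat.mul_add_div (by omega), Nat.div_eq_of_lt (by omega)]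
        omega
      · rw [if_neg h0] at hh
        have e2 : items.length + k = (k + 1) * q + k := by omega
        rw [e2, Nat.mul_add_div (by omega), Nat.div_eq_of_lt (by omega)]
        omega
    have hcast : (items.length : Int) + ((k : Int) + 1) - 1 = ((items.length + k : Nat) : Int) := by
      push_cast; ring
    have hfd : PySem.Int.floordiv ((items.length : Int) + ((k : Int) + 1) - 1) ((k : Int) + 1)
        = ((h : Nat) : Int) := by
      rw [hcast]
      have e3 : ((k : Int) + 1) = ((k + 1 : Nat) : Int) := by push_cast; ring
      rw [e3, PySem.Int.floordiv_natCast, hdiv]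
    -- unfold one step of B
    rw [pvGoB, hfd, PySem.List.slice_to_natCast, PySem.List.slice_from_natCast]
    -- recurse on the rest
    have hlen : (items.drop h).length = k * q + (if 0 < r then r - 1 else 0) := by
      simp only [List.length_drop, hn]
      by_cases h0 : 0 < r
      · rw [if_pos h0] at hh ⊢; omega
      · rw [if_neg h0] at hh ⊢; omega
    rw [ih (items.drop h) _ q (if 0 < r then r - 1 else 0) hlen (by split_ifs <;> omega)]
    -- assemble: head fold is fold 0, shifted folds are folds 1..k
    rw [List.range_succ_eq_map, List.map_cons, List.map_map, List.append_assoc,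
        List.singleton_append]
    congr 2
    · simp [pvFold, hh]
    · apply List.map_congr_left
      intro j _
      simp only [Function.comp, pvFold, List.drop_drop, Nat.succ_eq_add_one]
      have ejq : (j + 1) * q = j * q + q := by ring
      have e2 : h + (j * q + min j (if 0 < r then r - 1 else 0))
          = (j + 1) * q + min (j + 1) r := by
        by_cases h0 : 0 < r
        · rw [if_pos h0] at hh ⊢; omega
        · rw [if_neg h0] at hh ⊢; omega
      have e4 : (q + (if j < (if 0 < r then r - 1 else 0) then 1 else 0))
          = (q + (if j + 1 < r then 1 else 0)) := by
        split_ifs <;> omega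
      rw [e2, e4]

-- A's loop produces the same closed-form folds (loop invariant, m iterations)
lemma pvLoopA (items : List (String × List String)) (q r : Nat) (m : Nat) :
    ((List.range m).map (fun (j : Nat) => (j : Int))).foldl
      (fun (acc : List (List (String × List String)) × Int) i =>
        (acc.1 ++ [(PySem.Dict.ofList (PySem.List.slice items (some acc.2)
            (some (acc.2 + (q : Int) + (if i < (r : Int) then 1 else 0))))).items],
         acc.2 + (q : Int) + (if i < (r : Int) then 1 else 0)))
      ([], 0)
    = ((List.range m).map (pvFold items q r), ((m * q + min m r : Nat) : Int)) := by
  induction m with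
  | zero => simp
  | succ m ih =>
    rw [List.range_succ, List.map_append, List.map_append, List.foldl_append, ih]
    simp only [List.map_cons, List.map_nil, List.foldl_cons, List.foldl_nil]
    have hlt : ((m : Int) < (r : Int)) ↔ (m < r) := by exact_mod_cast Iff.rfl
    have hstep : ((m * q + min m r : Nat) : Int) + (q : Int) + (if (m : Int) < (r : Int) then 1 else 0)
        = ((m * q + min m r + (q + (if m < r then 1 else 0)) : Nat) : Int) := by
      rw [if_congr hlt rfl rfl]; push_cast; split_ifs <;> ring
    have hend : (m * q + min m r) + (q + (if m < r then 1 else 0))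
        = (m + 1) * q + min (m + 1) r := by
      have : (m + 1) * q = m * q + q := by ring
      split_ifs <;> omega
    rw [hstep]
    congr 1
    · congr 1
      simp only [PySem.List.slice_natCast, pvFold, Nat.add_sub_cancel_left]
    · rw [hend]

-- ===== VERDICT (by name: the statement is the Claim_ definition above) =====
theorem split_dict_into_folds_spec : Claim_equal_split_dict_into_folds := by
  intro data_dict num_folds _ hpre
  have hpre1 : 1 ≤ num_folds := hpre
  have hk : num_folds = ((num_folds.toNat : Nat) : Int) := by omega
  unfold Spec_split_dict_into_folds split_dict_into_folds split_dict_into_folds_alt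
  simp only []
  rw [hk, PySem.Int.floordiv_natCast, PySem.Int.mod_natCast, PySem.List.pyRange_zero_natCast]
  have hk1 : 1 ≤ num_folds.toNat := by omega
  rw [pvLoopA data_dict (data_dict.length / num_folds.toNat) (data_dict.length % num_folds.toNat)
      num_folds.toNat]
  rw [Int.toNat_natCast]
  rw [pvGoB_eq num_folds.toNat data_dict [] (data_dict.length / num_folds.toNat)
      (data_dict.length % num_folds.toNat)
      (Nat.div_add_mod data_dict.length num_folds.toNat).symm
      (Or.inl (Nat.mod_lt _ (by omega)))]
  rw [List.nil_append]
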